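-- pv_equiv track=rewrite | github.com/SJTU-IPADS/dst | mysql-dst/mysql-cluster/scripts/test_main.py | generate_client_hosts
-- ===== SOURCE A (Python) =====
-- threads_per_client = 48
--
-- def max_clients(host):
--     return len(host) * threads_per_client
--
-- def generate_client_hosts(num,hosts):
--     assert (num <= max_clients(hosts))
--     res = []
--     idx = 0
--     alocated = 0
--     while (alocated + threads_per_client) <= num:
--         res.append((hosts[idx],threads_per_client))
--         idx = (idx + 1) % len(hosts)
--         alocated += threads_per_client
--     if alocated < num:
--         assert alocated + threads_per_client > num
--         res.append((hosts[idx],num - alocated))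
--     return res
-- ===== SOURCE B (Python) =====
-- threads_per_client = 48
--
-- def generate_client_hosts(num, hosts):
--     assert num <= len(hosts) * threads_per_client
--     q, r = divmod(num, threads_per_client) if num > 0 else (0, 0)
--     res = [(hosts[i % len(hosts)], threads_per_client) for i in range(q)]
--     if r:
--         res.append((hosts[q % len(hosts)], r))
--     return res
-- ===== Notes on version B (the rewrite author's own statement) =====
-- stated objective: simpler
-- what changed: Replaces the accumulating while loop (idx/alocated state plus inner assert) with a closed-form divmod chunk count: a comprehension over range(q) plus a single remainder branch.
import Mathlib
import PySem

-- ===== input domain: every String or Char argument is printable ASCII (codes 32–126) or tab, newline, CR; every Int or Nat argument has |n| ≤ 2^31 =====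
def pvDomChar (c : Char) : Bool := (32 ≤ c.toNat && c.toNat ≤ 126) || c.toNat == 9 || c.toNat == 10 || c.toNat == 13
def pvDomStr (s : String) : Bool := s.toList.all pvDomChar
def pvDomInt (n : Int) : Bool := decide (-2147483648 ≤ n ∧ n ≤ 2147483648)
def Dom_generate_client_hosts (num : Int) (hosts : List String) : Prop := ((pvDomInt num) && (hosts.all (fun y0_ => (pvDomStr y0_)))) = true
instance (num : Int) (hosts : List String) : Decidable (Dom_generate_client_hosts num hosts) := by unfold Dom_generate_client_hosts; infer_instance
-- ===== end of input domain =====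

-- B replaces A's accumulating while loop with a closed-form divmod chunk count plus a single remainder branch (objective: simpler).

-- ===== PORT A =====
-- the while loop of A: state (res, idx, alocated)
def gchLoop (num : Int) (hosts : List String) (res : List (String × Int)) (idx alocated : Int) : (List (String × Int)) × Int × Int :=
  if _h : alocated + 48 ≤ num then
    gchLoop num hosts (res ++ [(PySem.List.pyGetD hosts idx "", 48)])
      (PySem.Int.mod (idx + 1) hosts.length) (alocated + 48)
  else (res, idx, alocated)
termination_by (num - alocated).toNat
decreasing_by omega

def generate_client_hosts (num : Int) (hosts : List String) : List (String × Int) :=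
  let s := gchLoop num hosts [] 0 0
  if s.2.2 < num then s.1 ++ [(PySem.List.pyGetD hosts s.2.1 "", num - s.2.2)] else s.1

-- ===== PORT B =====
def generate_client_hosts_alt (num : Int) (hosts : List String) : List (String × Int) :=
  let qr := if num > 0 then (PySem.Int.floordiv num 48, PySem.Int.mod num 48) else (0, 0)
  let res := (PySem.List.pyRange 0 qr.1 1).map
    (fun i => (PySem.List.pyGetD hosts (PySem.Int.mod i hosts.length) "", (48 : Int)))
  if qr.2 ≠ 0 then res ++ [(PySem.List.pyGetD hosts (PySem.Int.mod qr.1 hosts.length) "", qr.2)] else res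

-- ===== PRECONDITION & SPEC =====
-- Pre_: exactly A's assert 'num <= len(hosts)*threads_per_client'; A raises AssertionError otherwise.
def Pre_generate_client_hosts (num : Int) (hosts : List String) : Prop :=
  num ≤ 48 * hosts.length
instance (num : Int) (hosts : List String) : Decidable (Pre_generate_client_hosts num hosts) := by
  unfold Pre_generate_client_hosts; infer_instance

def pvWitness_generate_client_hosts : Int × List String := (50, ["a", "b"])

def Spec_generate_client_hosts (num : Int) (hosts : List String) (out : List (String × Int)) : Prop := out = generate_client_hosts_alt num hosts
instance (num : Int) (hosts : List String) (out : List (String × Int)) : Decidable (Spec_generate_client_hosts num hosts out) := by unfold Spec_generate_client_hosts; infer_instance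

-- ===== CLAIM (what is proved, stated in full; the proofs are below) =====
def Claim_equal_generate_client_hosts : Prop := ∀ (num : Int) (hosts : List String), Dom_generate_client_hosts num hosts → Pre_generate_client_hosts num hosts → Spec_generate_client_hosts num hosts (generate_client_hosts num hosts)

-- ===== LEMMAS AND PROOFS =====

-- one full chunk of the result, indexed by the chunk number
def gchItem (hosts : List String) (m : Nat) : String × Int :=
  (PySem.List.pyGetD hosts ((m % hosts.length : Nat) : Int) "", 48)

lemma gchLoop_spec (num : Int) (hosts : List String) :
    ∀ (k j : Nat) (res : List (String × Int)),
      48 * ((j : Int) + k) ≤ num → num < 48 * ((j : Int) + k) + 48 →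
      gchLoop num hosts res ((j % hosts.length : Nat) : Int) (48 * (j : Int))
        = (res ++ (List.range k).map (fun i => gchItem hosts (j + i)),
           (((j + k) % hosts.length : Nat) : Int), 48 * ((j : Int) + k)) := by
  intro k
  induction k with
  | zero =>
    intro j res h1 h2
    rw [gchLoop]
    rw [dif_neg (by push_cast at h2 ⊢; omega)]
    simp
  | succ k ih =>
    intro j res h1 h2
    rw [gchLoop]
    rw [dif_pos (by push_cast at h1 ⊢; omega)]
    have hidx : PySem.Int.mod (((j % hosts.length : Nat) : Int) + 1) (hosts.length : Int)
        = (((j + 1) % hosts.length : Nat) : Int) := by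
      have hc : ((j % hosts.length : Nat) : Int) + 1 = ((j % hosts.length + 1 : Nat) : Int) := by
        push_cast; ring
      rw [hc, PySem.Int.mod_natCast]
      exact congrArg Nat.cast (Nat.mod_add_mod j hosts.length 1)
    have halloc : 48 * (j : Int) + 48 = 48 * ((j + 1 : Nat) : Int) := by push_cast; ring
    have hlist : (List.range (k + 1)).map (fun i => gchItem hosts (j + i))
        = gchItem hosts j :: (List.range k).map (fun i => gchItem hosts (j + 1 + i)) := by
      rw [List.range_succ_eq_map, List.map_cons, List.map_map]
      refine congrArg₂ List.cons (by simp) ?_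
      apply List.map_congr_left
      intro i _
      simp only [Function.comp_apply]
      congr 1
      omega
    rw [hidx, halloc, ih (j + 1) _ (by push_cast at h1 ⊢; omega) (by push_cast at h2 ⊢; omega)]
    simp only [Prod.mk.injEq]
    refine ⟨?_, ?_, by push_cast; ring⟩
    · rw [hlist]
      simp [gchItem]
    · exact congrArg Nat.cast (congrArg (fun m => m % hosts.length) (by omega))

-- the common closed form both ports reach for positive num
def gchTarget (num : Int) (hosts : List String) : List (String × Int) :=
  (List.range (num.toNat / 48)).map (fun i => gchItem hosts i)
    ++ (if num.toNat % 48 ≠ 0 then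
          [(PySem.List.pyGetD hosts (((num.toNat / 48) % hosts.length : Nat) : Int) "",
            ((num.toNat % 48 : Nat) : Int))]
        else [])

lemma gch_eqn_pos (num : Int) (hosts : List String) (hnum : 0 < num) :
    generate_client_hosts num hosts = gchTarget num hosts := by
  have hmain := gchLoop_spec num hosts (num.toNat / 48) 0 []
    (by push_cast; omega) (by push_cast; omega)
  simp only [Nat.cast_zero, Nat.zero_mod, mul_zero, zero_add, List.nil_append] at hmain
  unfold generate_client_hosts gchTarget
  rw [hmain]
  have hrem : num - 48 * ((num.toNat / 48 : Nat) : Int) = ((num.toNat % 48 : Nat) : Int) := by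
    omega
  have hcond : (48 * ((num.toNat / 48 : Nat) : Int) < num) ↔ (num.toNat % 48 ≠ 0) := by
    omega
  simp only [hrem, hcond]
  split_ifs <;> simp

lemma gch_alt_eqn_pos (num : Int) (hosts : List String) (hnum : 0 < num) :
    generate_client_hosts_alt num hosts = gchTarget num hosts := by
  have hnn : num = ((num.toNat : Nat) : Int) := by omega
  have hq : PySem.Int.floordiv num 48 = ((num.toNat / 48 : Nat) : Int) := by
    rw [hnn]; exact_mod_cast PySem.Int.floordiv_natCast num.toNat 48
  have hr : PySem.Int.mod num 48 = ((num.toNat % 48 : Nat) : Int) := by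
    rw [hnn]; exact_mod_cast PySem.Int.mod_natCast num.toNat 48
  unfold generate_client_hosts_alt gchTarget
  rw [if_pos hnum]
  simp only [hq, hr, PySem.List.pyRange_zero_natCast, List.map_map]
  have hf : ((fun i => (PySem.List.pyGetD hosts (PySem.Int.mod i (hosts.length : Int)) "", (48 : Int)))
        ∘ fun (k : Nat) => (k : Int))
      = fun (k : Nat) => gchItem hosts k := by
    funext k
    simp only [Function.comp_apply, gchItem, PySem.Int.mod_natCast]
  rw [hf, PySem.Int.mod_natCast]
  have : (((num.toNat % 48 : Nat) : Int) ≠ 0) ↔ (num.toNat % 48 ≠ 0) := by omega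
  simp only [this]
  split_ifs <;> simp

lemma gch_nonpos (num : Int) (hosts : List String) (hnum : ¬ 0 < num) :
    generate_client_hosts num hosts = [] ∧ generate_client_hosts_alt num hosts = [] := by
  constructor
  · unfold generate_client_hosts
    rw [gchLoop, dif_neg (by omega)]
    simp only
    rw [if_neg (by omega)]
  · unfold generate_client_hosts_alt
    have h : (if num > 0 then (PySem.Int.floordiv num 48, PySem.Int.mod num 48) else ((0 : Int), (0 : Int))) = (0, 0) :=
      if_neg (by omega)
    rw [h]
    simp

-- ===== VERDICT (by name: the statement is the Claim_ definition above) =====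
theorem generate_client_hosts_spec : Claim_equal_generate_client_hosts := by
  intro num hosts _hdom _hpre
  unfold Spec_generate_client_hosts
  by_cases hnum : 0 < num
  · rw [gch_eqn_pos num hosts hnum, gch_alt_eqn_pos num hosts hnum]
  · rw [(gch_nonpos num hosts hnum).1, (gch_nonpos num hosts hnum).2]
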